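-- pv_equiv track=rewrite | github.com/MqttLab/testBranchs | main.py | hc_o_sc
-- ===== SOURCE A (Python) =====
-- def hc_o_sc(direccion):
--     f_h = False
--     f_hc = False
--     ctrl = None
--     for letra in direccion:
--         if letra == "H":
--             f_h = True
--         if letra == "C" and f_h:
--             f_hc = True
--             f_h = False
--     if f_hc:
--         ctrl = "HC"
--     else:
--         ctrl = "SC"
--     return ctrl
-- ===== SOURCE B (Python) =====
-- def hc_o_sc(direccion):
--     for j, letra in enumerate(direccion):
--         if letra == "C" and "H" in direccion[:j]:
--             return "HC"
--     return "SC"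
-- ===== Notes on version B (the rewrite author's own statement) =====
-- stated objective: alternative
-- what changed: Replaces the single-pass two-flag boolean state machine with a brute-force per-position check: at each 'C' it searches the strict prefix direccion[:j] for an 'H' and returns at the first hit.
import Mathlib
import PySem

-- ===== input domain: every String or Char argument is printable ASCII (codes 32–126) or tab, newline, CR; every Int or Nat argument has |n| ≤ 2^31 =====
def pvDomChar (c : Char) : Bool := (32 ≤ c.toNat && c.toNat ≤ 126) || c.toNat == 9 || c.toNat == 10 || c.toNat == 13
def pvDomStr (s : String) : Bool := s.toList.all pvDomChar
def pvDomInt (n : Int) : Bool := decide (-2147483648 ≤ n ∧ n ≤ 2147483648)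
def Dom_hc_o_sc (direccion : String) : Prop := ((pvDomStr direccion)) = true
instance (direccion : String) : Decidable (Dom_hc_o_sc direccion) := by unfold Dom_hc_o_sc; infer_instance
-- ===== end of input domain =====

-- B replaces A's single-pass two-flag boolean state machine by a brute-force per-position check:
-- at each 'C' it searches the strict prefix for an 'H' (nested scans; alternative, not faster).


-- ===== PORT A =====
-- the loop body of A: updates (f_h, f_hc) for one character, in A's statement order
def hcStep (s : Bool × Bool) (letra : Char) : Bool × Bool :=
  let f_h := if letra == 'H' then true else s.1
  if letra == 'C' && f_h then (false, true) else (f_h, s.2)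

def hc_o_sc (direccion : String) : String :=
  let st := direccion.toList.foldl hcStep (false, false)
  if st.2 then "HC" else "SC"

-- ===== PORT B =====
-- B's loop: 'for j, letra in enumerate(direccion)', early return "HC" at the first 'C'
-- whose strict prefix direccion[:j] contains an 'H'
def bGo (full : String) (j : Nat) : List Char → String
  | [] => "SC"
  | letra :: rest =>
    if letra == 'C' && PySem.Str.isIn "H" (PySem.Str.slice full none (some (j : Int))) then "HC"
    else bGo full (j + 1) rest

def hc_o_sc_alt (direccion : String) : String :=
  bGo direccion 0 direccion.toList

-- ===== PRECONDITION & SPEC =====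
def Spec_hc_o_sc (direccion : String) (out : String) : Prop := out = hc_o_sc_alt direccion
instance (direccion : String) (out : String) : Decidable (Spec_hc_o_sc direccion out) := by unfold Spec_hc_o_sc; infer_instance

-- ===== CLAIM (what is proved, stated in full; the proofs are below) =====
def Claim_equal_hc_o_sc : Prop := ∀ (direccion : String), Dom_hc_o_sc direccion → Spec_hc_o_sc direccion (hc_o_sc direccion)

-- ===== LEMMAS AND PROOFS =====

-- "there is a 'C' at an index ≥ j whose strict prefix contains an 'H'"
def hasHC (cs : List Char) (j : Nat) : Prop := ∃ i, j ≤ i ∧ cs[i]? = some 'C' ∧ 'H' ∈ cs.take i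

lemma mem_take_iff (cs : List Char) (i : Nat) (c : Char) :
    c ∈ cs.take i ↔ ∃ h, h < i ∧ cs[h]? = some c := by
  constructor
  · intro hm
    obtain ⟨h, hlt, hv⟩ := List.getElem_of_mem hm
    have hhi : h < i := lt_of_lt_of_le hlt (by simpa using List.length_take_le i cs)
    refine ⟨h, hhi, ?_⟩
    rw [← List.getElem?_take_of_lt hhi, List.getElem?_eq_getElem hlt, hv]
  · rintro ⟨h, hhi, hv⟩
    exact List.mem_of_getElem? (by rw [List.getElem?_take_of_lt hhi, hv])

-- ---- A-side lemmas (characterise the fold) ----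

lemma hcStep_snd (s : Bool × Bool) (c : Char) (h : s.2 = true) : (hcStep s c).2 = true := by
  unfold hcStep; split <;> (simp only []; split <;> simp [h])

lemma foldl_snd_true (cs : List Char) : ∀ s : Bool × Bool, s.2 = true → (cs.foldl hcStep s).2 = true := by
  induction cs with
  | nil => intro s h; exact h
  | cons c cs ih => intro s h; exact ih _ (hcStep_snd s c h)

lemma foldl_armed (cs : List Char) : (cs.foldl hcStep (true, false)).2 = decide ('C' ∈ cs) := by
  induction cs with
  | nil => rfl
  | cons c cs ih =>
    by_cases hc : c = 'C'
    · subst hc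
      simp only [List.foldl_cons]
      have hst : hcStep (true, false) 'C' = (false, true) := by decide
      rw [hst]
      simp [foldl_snd_true cs (false, true) rfl]
    · have hst : hcStep (true, false) c = (true, false) := by
        simp [hcStep, hc]
      simp [hst, ih, Ne.symm hc]

lemma hcStep_clear (c : Char) (h : c ≠ 'H') : hcStep (false, false) c = (false, false) := by
  simp [hcStep, h]

lemma foldl_no_H (cs : List Char) (h : 'H' ∉ cs) : (cs.foldl hcStep (false, false)).2 = false := by
  induction cs with
  | nil => rfl
  | cons c cs ih =>
    simp only [List.mem_cons, not_or] at h
    simp only [List.foldl_cons, hcStep_clear c (fun hc => h.1 hc.symm)]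
    exact ih h.2

lemma foldl_first_H (cs : List Char) (k : Nat) (hk : cs[k]? = some 'H')
    (hmin : ∀ i, i < k → cs[i]? ≠ some 'H') :
    (cs.foldl hcStep (false, false)).2 = decide ('C' ∈ cs.drop (k + 1)) := by
  induction cs generalizing k with
  | nil => simp at hk
  | cons c cs ih =>
    cases k with
    | zero =>
      simp only [List.getElem?_cons_zero, Option.some.injEq] at hk
      subst hk
      simp only [List.foldl_cons]
      have hst : hcStep (false, false) 'H' = (true, false) := by decide
      rw [hst]
      simpa using foldl_armed cs
    | succ k =>
      have hc : c ≠ 'H' := by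
        have := hmin 0 (Nat.succ_pos k); simpa using this
      simp only [List.getElem?_cons_succ] at hk
      simp only [List.foldl_cons, hcStep_clear c hc, List.drop_succ_cons]
      exact ih k hk (fun i hi => by
        have := hmin (i + 1) (by omega); simpa using this)

-- A's fold ends with f_hc set exactly on hasHC
lemma foldl_iff_hasHC (cs : List Char) :
    (cs.foldl hcStep (false, false)).2 = true ↔ hasHC cs 0 := by
  by_cases hH : 'H' ∈ cs
  · have hex : ∃ k : Nat, cs[k]? = some 'H' := by
      obtain ⟨n, hn, hv⟩ := List.getElem_of_mem hH
      exact ⟨n, by rw [List.getElem?_eq_getElem hn, hv]⟩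
    have hk : cs[Nat.find hex]? = some 'H' := Nat.find_spec hex
    have hmin : ∀ i, i < Nat.find hex → cs[i]? ≠ some 'H' := fun i hi => Nat.find_min hex hi
    rw [foldl_first_H cs (Nat.find hex) hk hmin]
    set k := Nat.find hex with hkdef
    constructor
    · intro h
      have hC : 'C' ∈ cs.drop (k + 1) := by simpa using h
      obtain ⟨m, hm, hv⟩ := List.getElem_of_mem hC
      refine ⟨k + 1 + m, by omega, ?_, ?_⟩
      · rw [← List.getElem?_drop, List.getElem?_eq_getElem hm, hv]
      · exact (mem_take_iff cs (k + 1 + m) 'H').mpr ⟨k, by omega, hk⟩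
    · rintro ⟨i, -, hiC, hiH⟩
      obtain ⟨h, hhi, hv⟩ := (mem_take_iff cs i 'H').mp hiH
      have hkh : k ≤ h := by
        by_contra hc
        exact hmin h (by omega) hv
      have : (cs.drop (k + 1))[i - (k + 1)]? = some 'C' := by
        rw [List.getElem?_drop]
        have : k + 1 + (i - (k + 1)) = i := by omega
        rw [this, hiC]
      simpa using List.mem_of_getElem? this
  · rw [foldl_no_H cs hH]
    simp only [Bool.false_eq_true, false_iff]
    rintro ⟨i, -, -, hiH⟩
    exact hH (List.mem_of_mem_take hiH)

-- ---- B-side lemmas: bGo decides hasHC from position j ----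

lemma isIn_H_take (full : String) (j : Nat) :
    (PySem.Str.isIn "H" (PySem.Str.slice full none (some (j : Int))) = true)
      ↔ 'H' ∈ full.toList.take j := by
  rw [PySem.Str.isIn_eq]
  simp only [PySem.Str.toList_slice, PySem.Chars.slice_eq_listSlice,
    show ("H" : String).toList = ['H'] from rfl]
  rw [PySem.List.slice_to full.toList (by positivity)]
  rw [PySem.Chars.isIn_iff_infix]
  simp [List.singleton_infix_iff, Int.toNat_natCast]

lemma bGo_spec (full : String) : ∀ (rest : List Char) (j : Nat),
    full.toList.drop j = rest →
    (bGo full j rest = "HC" ∨ bGo full j rest = "SC")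
      ∧ (bGo full j rest = "HC" ↔ hasHC full.toList j) := by
  intro rest
  induction rest with
  | nil =>
    intro j hdrop
    have hlen : full.toList.length ≤ j := List.drop_eq_nil_iff.mp hdrop
    refine ⟨Or.inr rfl, ?_⟩
    simp only [bGo]
    constructor
    · intro h; exact absurd h (by decide)
    · rintro ⟨i, hji, hiC, -⟩
      have := (List.getElem?_eq_some_iff.mp hiC).1
      omega
  | cons letra rest ih =>
    intro j hdrop
    have hj : full.toList[j]? = some letra := by
      have := congrArg (fun l => l[0]?) hdrop
      simpa [List.getElem?_drop] using this
    have hdrop' : full.toList.drop (j + 1) = rest := by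
      have := congrArg (List.drop 1) hdrop
      simpa [List.drop_drop, Nat.add_comm] using this
    obtain ⟨ihv, ihiff⟩ := ih (j + 1) hdrop'
    cases hcnd : (letra == 'C' && PySem.Str.isIn "H" (PySem.Str.slice full none (some (j : Int)))) with
    | true =>
      obtain ⟨hC, hIn⟩ := Bool.and_eq_true_iff.mp hcnd
      have hHm : 'H' ∈ full.toList.take j := (isIn_H_take full j).mp hIn
      have hres : bGo full j (letra :: rest) = "HC" := by
        simp only [bGo, hcnd, if_true]
      refine ⟨Or.inl hres, ?_⟩
      rw [hres]
      simp only [true_iff]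
      exact ⟨j, le_refl j, by rw [hj, show letra = 'C' from by simpa using hC], hHm⟩
    | false =>
      have hres : bGo full j (letra :: rest) = bGo full (j + 1) rest := by
        simp only [bGo, hcnd, Bool.false_eq_true, if_false]
      have hiff : hasHC full.toList j ↔ hasHC full.toList (j + 1) := by
        constructor
        · rintro ⟨i, hji, hiC, hiH⟩
          refine ⟨i, ?_, hiC, hiH⟩
          rcases Nat.lt_or_ge j i with h | h
          · omega
          · exfalso
            have hij : i = j := by omega
            subst hij
            rw [hj] at hiC
            have hC : letra = 'C' := by simpa using hiC
            have hIn : PySem.Str.isIn "H" (PySem.Str.slice full none (some (i : Int))) = true :=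
              (isIn_H_take full i).mpr hiH
            rw [hC, hIn] at hcnd
            simp at hcnd
        · rintro ⟨i, hji, hiC, hiH⟩; exact ⟨i, by omega, hiC, hiH⟩
      rw [hres, hiff]
      exact ⟨ihv, ihiff⟩

-- ===== VERDICT (by name: the statement is the Claim_ definition above) =====
theorem hc_o_sc_spec : Claim_equal_hc_o_sc := by
  intro direccion _
  unfold Spec_hc_o_sc hc_o_sc hc_o_sc_alt
  obtain ⟨hval, hiff⟩ := bGo_spec direccion direccion.toList 0 (by simp)
  cases hb : (direccion.toList.foldl hcStep (false, false)).2 with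
  | true =>
    have : hasHC direccion.toList 0 := (foldl_iff_hasHC direccion.toList).mp hb
    rw [if_pos hb]
    exact (hiff.mpr this).symm
  | false =>
    have hn : ¬ hasHC direccion.toList 0 := fun h => by
      rw [(foldl_iff_hasHC direccion.toList).mpr h] at hb
      exact absurd hb (by decide)
    rw [if_neg (by simp [hb])]
    rcases hval with h | h
    · exact absurd (hiff.mp h) hn
    · exact h.symm
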